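-- pv_equiv track=rewrite | github.com/nguyentran6698/LC_Practice | contest/biweekly94/1.py | solution
-- ===== SOURCE A (Python) =====
-- def solution(a) -> int:
--     # Run from the top to bottom
--     res = 0
--     for i in range(len(a)):
--         if a[i] != 1:
--             continue
--         # at i position go upward
--         cnt = 0
--         for j in range(i+1, len(a)):
--             if a[j] == -1:
--                 res = max(res,cnt)
--                 break
--             # stop when hit 1
--             elif a[j] == 1:
--                 cnt = 0
--                 break
--             cnt += 1
--         # at i position go backward
--         cnt = 0
--         for j in range(i-1, -1, -1):
--             if a[j] == -1:
--                 res = max(res,cnt)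
--                 break
--             elif a[j] == 1:
--                 cnt = 0
--                 break
--             cnt += 1
--     return res
-- ===== SOURCE B (Python) =====
-- def solution(a) -> int:
--     # single left-to-right sweep: track the last marker (1 or -1) and the
--     # number of non-marker elements since it; count a gap when markers alternate
--     res = 0
--     last = None
--     gap = 0
--     for x in a:
--         if x == 1 or x == -1:
--             if last is not None and last != x:
--                 res = max(res, gap)
--             last = x
--             gap = 0
--         else:
--             gap += 1
--     return res
-- ===== Notes on version B (the rewrite author's own statement) =====
-- stated objective: simpler
-- what changed: Replaced the per-1 forward/backward rescans with a single left-to-right pass that keeps the last marker (1 or -1) and the count of non-markers since it, taking the count whenever adjacent markers alternate.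
import Mathlib
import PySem

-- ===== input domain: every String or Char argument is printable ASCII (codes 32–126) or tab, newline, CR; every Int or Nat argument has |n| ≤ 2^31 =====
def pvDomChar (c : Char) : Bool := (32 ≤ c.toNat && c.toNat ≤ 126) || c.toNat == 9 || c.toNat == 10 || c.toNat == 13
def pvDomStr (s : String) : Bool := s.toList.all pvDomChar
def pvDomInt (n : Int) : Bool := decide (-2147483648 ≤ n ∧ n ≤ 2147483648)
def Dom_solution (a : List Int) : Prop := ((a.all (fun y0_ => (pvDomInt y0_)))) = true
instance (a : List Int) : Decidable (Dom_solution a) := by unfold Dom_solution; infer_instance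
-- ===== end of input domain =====

-- B replaces A's per-1 forward/backward rescans by a single left-to-right sweep
-- keeping the last marker and the gap since it (objective: simpler).

-- ===== PORT A =====
-- inner loop of A (the upward and the backward scan have this exact body)
def fwdA (a : List Int) (cnt res : Int) : List Int → Int
  | [] => res
  | j :: js =>
    if PySem.List.pyGetD a j 0 = -1 then max res cnt
    else if PySem.List.pyGetD a j 0 = 1 then res
    else fwdA a (cnt + 1) res js

-- body of A's outer loop
def stepA (a : List Int) (res i : Int) : Int :=
  if PySem.List.pyGetD a i 0 ≠ 1 then res
  else
    fwdA a 0 (fwdA a 0 res (PySem.List.pyRange (i + 1) a.length 1))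
      (PySem.List.pyRange (i - 1) (-1) (-1))

def solution (a : List Int) : Int :=
  (PySem.List.pyRange 0 a.length 1).foldl (stepA a) 0

-- ===== PORT B =====
-- body of B's single sweep: state = (last marker, gap since it, best so far)
def stepB (st : Option Int × Int × Int) (x : Int) : Option Int × Int × Int :=
  if x = 1 ∨ x = -1 then
    (some x, 0, if st.1 ≠ none ∧ st.1 ≠ some x then max st.2.2 st.2.1 else st.2.2)
  else (st.1, st.2.1 + 1, st.2.2)

def solution_alt (a : List Int) : Int :=
  (a.foldl stepB (none, 0, 0)).2.2

-- ===== PRECONDITION & SPEC =====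
def Spec_solution (a : List Int) (out : Int) : Prop := out = solution_alt a
instance (a : List Int) (out : Int) : Decidable (Spec_solution a out) := by unfold Spec_solution; infer_instance

-- ===== CLAIM (what is proved, stated in full; the proofs are below) =====
def Claim_equal_solution : Prop := ∀ (a : List Int), Dom_solution a → Spec_solution a (solution a)

-- ===== LEMMAS AND PROOFS =====

-- list-level version of A's inner scan
def fwdL (cnt res : Int) : List Int → Int
  | [] => res
  | x :: xs => if x = -1 then max res cnt else if x = 1 then res else fwdL (cnt + 1) res xs

-- contribution of a scan: gap to the first -1, 0 if a 1 (or the end) comes first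
def fscan (g : Int) : List Int → Int
  | [] => 0
  | x :: xs => if x = -1 then g else if x = 1 then 0 else fscan (g + 1) xs

-- A's outer loop, list form: pre = reversed processed prefix, then suffix
def A2 (pre : List Int) (res : Int) : List Int → Int
  | [] => res
  | x :: suf =>
    if x = 1 then A2 (x :: pre) (fwdL 0 (fwdL 0 res suf) pre) suf
    else A2 (x :: pre) res suf

-- A2 with the accumulator factored out
def A3 (pre : List Int) : List Int → Int
  | [] => 0
  | x :: suf =>
    if x = 1 then max (max (fscan 0 suf) (fscan 0 pre)) (A3 (x :: pre) suf)
    else A3 (x :: pre) suf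

-- B's sweep with the accumulator factored out
def ref (last : Option Int) (gap : Int) : List Int → Int
  | [] => 0
  | x :: xs =>
    if x = 1 ∨ x = -1 then
      max (if last ≠ none ∧ last ≠ some x then gap else 0) (ref (some x) 0 xs)
    else ref last (gap + 1) xs

-- first marker of a (reversed-prefix) list, and the non-marker run before it
def fm : List Int → Option Int
  | [] => none
  | x :: xs => if x = 1 ∨ x = -1 then some x else fm xs

def leadGap : List Int → Int
  | [] => 0
  | x :: xs => if x = 1 ∨ x = -1 then 0 else leadGap xs + 1

theorem fscan_nonneg (l : List Int) (g : Int) (hg : 0 ≤ g) : 0 ≤ fscan g l := by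
  induction l generalizing g with
  | nil => simp [fscan]
  | cons x xs ih =>
    simp only [fscan]; split_ifs with h1 h2
    · exact hg
    · exact le_refl 0
    · exact ih (g + 1) (by omega)

theorem ref_nonneg (l : List Int) (last : Option Int) (gap : Int) : 0 ≤ ref last gap l := by
  induction l generalizing last gap with
  | nil => simp [ref]
  | cons x xs ih =>
    by_cases h : x = 1 ∨ x = -1
    · have h2 := ih (some x) 0
      simp only [ref, if_pos h]
      omega
    · simp only [ref, if_neg h]
      exact ih last (gap + 1)

theorem leadGap_nonneg (l : List Int) : 0 ≤ leadGap l := by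
  induction l with
  | nil => simp [leadGap]
  | cons x xs ih => simp only [leadGap]; split_ifs with h <;> omega

theorem ref_none_gap (l : List Int) (g g' : Int) : ref none g l = ref none g' l := by
  induction l generalizing g g' with
  | nil => rfl
  | cons x xs ih =>
    by_cases h : x = 1 ∨ x = -1
    · simp [ref, h]
    · simp only [ref, if_neg h]
      exact ih (g + 1) (g' + 1)

theorem refC (l : List Int) (g : Int) :
    ref (some 1) g l = max (fscan g l) (ref none 0 l) := by
  induction l generalizing g with
  | nil => simp [ref, fscan]
  | cons x xs ih =>
    have hr := ref_nonneg xs none 0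
    by_cases h1 : x = 1
    · subst h1
      have hf := fscan_nonneg xs 0 (le_refl 0)
      have hih := ih 0
      simp [ref, fscan, hih]
    · by_cases h2 : x = -1
      · subst h2
        have hrm := ref_nonneg xs (some (-1)) 0
        simp [ref, fscan]
        omega
      · have hm : ¬ (x = 1 ∨ x = -1) := by tauto
        simp only [ref, fscan, if_neg hm, if_neg h2, if_neg h1]
        rw [ih (g + 1), ref_none_gap xs (0 + 1) 0]

theorem fwdL_max (l : List Int) (g res : Int) (hg : 0 ≤ g) (hres : 0 ≤ res) :
    fwdL g res l = max res (fscan g l) := by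
  induction l generalizing g with
  | nil => simp [fwdL, fscan]; omega
  | cons x xs ih =>
    simp only [fwdL, fscan]; split_ifs with h1 h2
    · rfl
    · omega
    · exact ih (g + 1) (by omega)

theorem A2_max (suf pre : List Int) (res : Int) (hres : 0 ≤ res) :
    A2 pre res suf = max res (A3 pre suf) := by
  induction suf generalizing pre res with
  | nil => simp [A2, A3]; omega
  | cons x suf ih =>
    simp only [A2, A3]; split_ifs with h
    · have hf : fwdL 0 res suf = max res (fscan 0 suf) :=
        fwdL_max suf 0 res (le_refl 0) hres
      have hfs := fscan_nonneg suf 0 (le_refl 0)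
      have hfp := fscan_nonneg pre 0 (le_refl 0)
      have hf2 : fwdL 0 (fwdL 0 res suf) pre = max (max res (fscan 0 suf)) (fscan 0 pre) := by
        rw [hf]; exact fwdL_max pre 0 _ (le_refl 0) (by omega)
      rw [hf2, ih (x :: pre) _ (by omega)]
      omega
    · exact ih (x :: pre) res hres

theorem fm_cases (l : List Int) : fm l = none ∨ fm l = some 1 ∨ fm l = some (-1) := by
  induction l with
  | nil => simp [fm]
  | cons x xs ih =>
    simp only [fm]; split_ifs with h
    · rcases h with h | h <;> subst h <;> simp
    · exact ih

theorem fscan_of_fm_one (l : List Int) (g : Int) (h : fm l = some 1) : fscan g l = 0 := by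
  induction l generalizing g with
  | nil => simp [fscan]
  | cons x xs ih =>
    simp only [fm] at h
    simp only [fscan]
    split_ifs with h1 h2
    · rw [if_pos (Or.inr h1)] at h; simp [h1] at h
    · rfl
    · have hm : ¬ (x = 1 ∨ x = -1) := by tauto
      rw [if_neg hm] at h; exact ih _ h

theorem fscan_of_fm_none (l : List Int) (g : Int) (h : fm l = none) : fscan g l = 0 := by
  induction l generalizing g with
  | nil => simp [fscan]
  | cons x xs ih =>
    simp only [fm] at h
    by_cases hm : x = 1 ∨ x = -1
    · rw [if_pos hm] at h; simp at h
    · rw [if_neg hm] at h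
      have h1 : ¬ x = 1 := by tauto
      have h2 : ¬ x = -1 := by tauto
      simp only [fscan, if_neg h2, if_neg h1]
      exact ih _ h

theorem fscan_of_fm_neg (l : List Int) (g : Int) (h : fm l = some (-1)) :
    fscan g l = g + leadGap l := by
  induction l generalizing g with
  | nil => simp [fm] at h
  | cons x xs ih =>
    simp only [fm] at h
    by_cases h2 : x = -1
    · subst h2; simp [fscan, leadGap]
    · by_cases h1 : x = 1
      · subst h1; rw [if_pos (Or.inl rfl)] at h; simp at h
      · have hm : ¬ (x = 1 ∨ x = -1) := by tauto
        rw [if_neg hm] at h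
        simp only [fscan, leadGap, if_neg h2, if_neg h1, if_neg hm]
        rw [ih _ h]; omega

-- the central cross-accounting lemma: A3 with a reversed prefix equals B's sweep
-- whose state is the prefix's first marker and leading gap (a pending 1 has
-- already been paid for by its forward scan, hence the special some-1 case)
theorem A3_eq_ref (suf pre : List Int) :
    A3 pre suf =
      if fm pre = some 1 then ref none 0 suf
      else ref (fm pre) (leadGap pre) suf := by
  induction suf generalizing pre with
  | nil => simp [A3, ref]
  | cons x suf ih =>
    have hlg := leadGap_nonneg pre
    have hrn := ref_nonneg suf none 0
    have hC := refC suf 0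
    have hfs := fscan_nonneg suf 0 (le_refl 0)
    by_cases h1 : x = 1
    · subst h1
      simp only [A3, reduceIte]
      have hih := ih (1 :: pre)
      rw [(by simp [fm] : fm ((1:Int) :: pre) = some 1), if_pos rfl] at hih
      rcases fm_cases pre with hp | hp | hp
      · rw [hp]
        rw [if_neg (by simp), fscan_of_fm_none pre 0 hp]
        simp [ref, hih, hC]
        omega
      · rw [hp]
        rw [if_pos rfl, fscan_of_fm_one pre 0 hp]
        simp [ref, hih, hC]
        omega
      · rw [hp]
        rw [if_neg (by simp), fscan_of_fm_neg pre 0 hp]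
        simp [ref, hih, hC]
        omega
    · by_cases h2 : x = -1
      · subst h2
        simp only [A3, reduceIte]
        have hih := ih ((-1) :: pre)
        rw [(by simp [fm] : fm ((-1 : Int) :: pre) = some (-1)), if_neg (by simp),
          (by simp [leadGap] : leadGap ((-1 : Int) :: pre) = 0)] at hih
        have hrn2 := ref_nonneg suf (some (-1)) 0
        rcases fm_cases pre with hp | hp | hp
        · rw [hp]
          rw [if_neg (by simp)]
          simp [ref, hih]
          omega
        · rw [hp]
          rw [if_pos rfl]
          simp [ref, hih]
          omega
        · rw [hp]
          rw [if_neg (by simp)]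
          simp [ref, hih]
          omega
      · have hm : ¬ (x = 1 ∨ x = -1) := by tauto
        simp only [A3, if_neg h1]
        have hih := ih (x :: pre)
        rw [(by simp [fm, if_neg hm] : fm (x :: pre) = fm pre),
          (by simp [leadGap, if_neg hm] : leadGap (x :: pre) = leadGap pre + 1)] at hih
        rw [hih]
        rcases fm_cases pre with hp | hp | hp
        · rw [hp]
          rw [if_neg (by simp), if_neg (by simp)]
          simp only [ref, if_neg hm]
        · rw [hp]
          rw [if_pos rfl, if_pos rfl]
          simp only [ref, if_neg hm]
          exact ref_none_gap suf 0 (0 + 1)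
        · rw [hp]
          rw [if_neg (by simp), if_neg (by simp)]
          simp only [ref, if_neg hm]

-- ===== bridging the index-based port A to the list forms =====

theorem fwdA_eq_fwd (a : List Int) (l : List Int) :
    ∀ (s : Nat), a.drop s = l → ∀ (cnt res : Int),
      fwdA a cnt res (PySem.List.pyRange (s : Int) a.length 1) = fwdL cnt res l := by
  induction l with
  | nil =>
    intro s hs cnt res
    have hlen : a.length ≤ s := by
      by_contra h
      have := List.drop_eq_nil_iff.mp hs
      omega
    rw [PySem.List.pyRange_one_eq_nil (by exact_mod_cast hlen)]
    rfl
  | cons x l ih =>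
    intro s hs cnt res
    have hlen : s < a.length := by
      by_contra h
      rw [List.drop_eq_nil_of_le (by omega)] at hs
      exact absurd hs (by simp)
    have hget : a[s]? = some x := by
      have h0 : (a.drop s)[0]? = a[s + 0]? := List.getElem?_drop
      rw [hs] at h0; simpa using h0.symm
    have hgd : PySem.List.pyGetD a (s : Int) 0 = x := by
      rw [PySem.List.pyGetD_natCast]
      simp [List.getD, hget]
    rw [PySem.List.pyRange_one_cons (by exact_mod_cast hlen)]
    have hdrop : a.drop (s + 1) = l := by
      rw [← List.drop_drop]
      rw [hs]
      simp
    simp only [fwdA, fwdL, hgd]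
    split_ifs with h1 h2
    · rfl
    · rfl
    · have : ((s : Int) + 1) = ((s + 1 : Nat) : Int) := by push_cast; ring
      rw [this]
      exact ih (s + 1) hdrop (cnt + 1) res

theorem fwdA_eq_bwd (a : List Int) :
    ∀ (i : Nat), i ≤ a.length → ∀ (cnt res : Int),
      fwdA a cnt res (PySem.List.pyRange ((i : Int) - 1) (-1) (-1)) =
        fwdL cnt res ((a.take i).reverse) := by
  intro i
  induction i with
  | zero => intro _ cnt res; rw [PySem.List.pyRange_neg_one_eq_nil (by omega)]; rfl
  | succ i ih =>
    intro hi cnt res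
    have hil : i < a.length := by omega
    have hcast : ((i + 1 : Nat) : Int) - 1 = (i : Nat) := by push_cast; ring
    rw [hcast, PySem.List.pyRange_neg_one_cons (by have := Int.natCast_nonneg i; omega)]
    have hx : a[i]? = some a[i] := List.getElem?_eq_getElem hil
    have hgd : PySem.List.pyGetD a (i : Int) 0 = a[i] := by
      rw [PySem.List.pyGetD_natCast]; simp [List.getD, hx]
    have htake : (a.take (i + 1)).reverse = a[i] :: (a.take i).reverse := by
      rw [List.take_succ, hx]
      simp
    rw [htake]
    simp only [fwdA, fwdL, hgd]
    split_ifs with h1 h2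
    · rfl
    · rfl
    · exact ih (by omega) (cnt + 1) res

theorem foldl_stepA_eq_A2 (a : List Int) (l : List Int) :
    ∀ (s : Nat), a.drop s = l → ∀ (res : Int),
      (PySem.List.pyRange (s : Int) a.length 1).foldl (stepA a) res =
        A2 ((a.take s).reverse) res l := by
  induction l with
  | nil =>
    intro s hs res
    have hlen : a.length ≤ s := by
      by_contra h
      have := List.drop_eq_nil_iff.mp hs
      omega
    rw [PySem.List.pyRange_one_eq_nil (by exact_mod_cast hlen)]
    rfl
  | cons x l ih =>
    intro s hs res
    have hlen : s < a.length := by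
      by_contra h
      rw [List.drop_eq_nil_of_le (by omega)] at hs
      exact absurd hs (by simp)
    have hget : a[s]? = some x := by
      have h0 : (a.drop s)[0]? = a[s + 0]? := List.getElem?_drop
      rw [hs] at h0; simpa using h0.symm
    have hgd : PySem.List.pyGetD a (s : Int) 0 = x := by
      rw [PySem.List.pyGetD_natCast]; simp [List.getD, hget]
    have hdrop : a.drop (s + 1) = l := by
      rw [← List.drop_drop, hs]; simp
    have htake : (a.take (s + 1)).reverse = x :: (a.take s).reverse := by
      rw [List.take_succ, hget]; simp
    rw [PySem.List.pyRange_one_cons (by exact_mod_cast hlen)]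
    rw [List.foldl_cons]
    have hcast : ((s : Int) + 1) = ((s + 1 : Nat) : Int) := by push_cast; ring
    simp only [A2]
    by_cases h1 : x = 1
    · rw [if_pos h1]
      have hstep : stepA a res (s : Int) =
          fwdL 0 (fwdL 0 res l) ((a.take s).reverse) := by
        unfold stepA
        rw [hgd, if_neg (by simp [h1])]
        rw [hcast, fwdA_eq_fwd a l (s + 1) hdrop 0 res]
        exact fwdA_eq_bwd a s (by omega) 0 (fwdL 0 res l)
      rw [hstep, hcast, ih (s + 1) hdrop _, htake, h1]
    · rw [if_neg h1]
      have hstep : stepA a res (s : Int) = res := by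
        unfold stepA; rw [hgd, if_pos (by simp [h1])]
      rw [hstep, hcast, ih (s + 1) hdrop res, htake]

-- ===== bridging port B to ref =====

theorem foldl_stepB_eq_ref (l : List Int) :
    ∀ (last : Option Int) (gap res : Int), 0 ≤ res →
      (l.foldl stepB (last, gap, res)).2.2 = max res (ref last gap l) := by
  induction l with
  | nil => intro last gap res h; simp [ref]; omega
  | cons x xs ih =>
    intro last gap res h
    rw [List.foldl_cons]
    by_cases hm : x = 1 ∨ x = -1
    · have hstep : stepB (last, gap, res) x =
          (some x, 0, if last ≠ none ∧ last ≠ some x then max res gap else res) := by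
        unfold stepB; rw [if_pos hm]
      rw [hstep]
      have hrn := ref_nonneg xs (some x) 0
      by_cases hc : last ≠ none ∧ last ≠ some x
      · rw [if_pos hc, ih (some x) 0 (max res gap) (by omega)]
        simp only [ref, if_pos hm, if_pos hc]
        omega
      · rw [if_neg hc, ih (some x) 0 res h]
        simp only [ref, if_pos hm, if_neg hc]
        omega
    · have hstep : stepB (last, gap, res) x = (last, gap + 1, res) := by
        unfold stepB; rw [if_neg hm]
      rw [hstep, ih last (gap + 1) res h]
      simp only [ref, if_neg hm]

-- ===== VERDICT (by name: the statement is the Claim_ definition above) =====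
theorem solution_spec : Claim_equal_solution := by
  intro a _
  unfold Spec_solution
  have hA : solution a = A2 [] 0 a := by
    unfold solution
    have := foldl_stepA_eq_A2 a a 0 (by simp) 0
    simpa using this
  have hB : solution_alt a = max 0 (ref none 0 a) := by
    unfold solution_alt
    exact foldl_stepB_eq_ref a none 0 0 (le_refl 0)
  have hA3 := A3_eq_ref a []
  rw [(by simp [fm] : fm ([] : List Int) = none), if_neg (by simp), (by simp [leadGap] : leadGap ([] : List Int) = 0)] at hA3
  have h2 : A2 [] 0 a = max 0 (A3 [] a) := A2_max a [] 0 (le_refl 0)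
  rw [hA, hB, h2, hA3]
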